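-- pv_equiv track=rewrite | github.com/ASSERT-KTH/Mokav | experiments/pynguin/c4b/single-return/generated_tests/src_2035/0/src_2035.py | func
-- ===== SOURCE A (Python) =====
-- def func(*args):
--
-- 	s = args[0]
-- 	count = 0
-- 	a = []
-- 	a = s.split('VK')
-- 	add = 0
-- 	for i in a:
-- 	    if ((len(i) > 1) and (i != 'KV')):
-- 	        add = 1
-- 	        break
-- 	return((s.count('VK') + add))
-- ===== SOURCE B (Python) =====
-- def func(*args):
--     s = args[0]
--     count = 0
--     add = 0
--     buf = []
--     i = 0
--     n = len(s)
--     while i < n: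
--         if s[i:i+2] == 'VK':
--             count += 1
--             if add == 0 and len(buf) > 1 and ''.join(buf) != 'KV':
--                 add = 1
--             buf = []
--             i += 2
--         else:
--             buf.append(s[i])
--             i += 1
--     if add == 0 and len(buf) > 1 and ''.join(buf) != 'KV':
--         add = 1
--     return count + add
-- ===== Notes on version B (the rewrite author's own statement) =====
-- stated objective: alternative
-- what changed: Replaces the two library scans (split on the two-character separator into a list of segments, plus a count of the separator) and the parts loop by one fused manual pass over s that counts matches and tests each segment in its own buffer as it closes.
import Mathlib
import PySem

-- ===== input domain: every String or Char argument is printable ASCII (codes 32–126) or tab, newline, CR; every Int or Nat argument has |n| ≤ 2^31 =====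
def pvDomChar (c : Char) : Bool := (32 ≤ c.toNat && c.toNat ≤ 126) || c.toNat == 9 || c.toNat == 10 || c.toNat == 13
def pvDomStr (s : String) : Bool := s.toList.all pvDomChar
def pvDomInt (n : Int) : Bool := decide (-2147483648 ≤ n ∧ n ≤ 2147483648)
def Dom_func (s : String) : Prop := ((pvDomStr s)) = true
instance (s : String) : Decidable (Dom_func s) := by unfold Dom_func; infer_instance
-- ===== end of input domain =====

-- B fuses A's split('VK')/count('VK') library scans and the parts loop into one manual pass with a segment buffer (alternative decomposition, same cost).

-- ===== PORT A =====
-- the loop "for i in a: if len(i) > 1 and i != 'KV': add = 1; break"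
def func_addLoop : List (List Char) → Int
  | [] => 0
  | i :: rest => if i.length > 1 ∧ i ≠ ['K', 'V'] then 1 else func_addLoop rest

def func (s : String) : Int :=
  let a := PySem.Chars.splitOn s.toList "VK".toList
  let add := func_addLoop a
  (PySem.Chars.count s.toList "VK".toList : Int) + add

-- ===== PORT B =====
-- "add == 0 and len(buf) > 1 and ''.join(buf) != 'KV'"  (the add==0 short-circuit is the '||' in funcAlt_go)
def funcAlt_flush (buf : List Char) : Bool := decide (buf.length > 1) && decide (buf ≠ ['K', 'V'])

-- the while loop of Source B: s[i:i+2]=='VK' → count += 1, close and test buf; else append s[i] to buf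
def funcAlt_go : List Char → Int → Bool → List Char → Int
  | [], count, add, buf => count + (if add || funcAlt_flush buf then 1 else 0)
  | c :: rest, count, add, buf =>
    if (c :: rest).take 2 = ['V', 'K'] then
      funcAlt_go rest.tail (count + 1) (add || funcAlt_flush buf) []
    else
      funcAlt_go rest count add (buf ++ [c])
  termination_by l => l.length
  decreasing_by
  · simp [List.length_tail]
  · simp

def func_alt (s : String) : Int := funcAlt_go s.toList 0 false []

-- ===== PRECONDITION & SPEC =====
def Spec_func (s : String) (out : Int) : Prop := out = func_alt s
instance (s : String) (out : Int) : Decidable (Spec_func s out) := by unfold Spec_func; infer_instance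

-- ===== CLAIM (what is proved, stated in full; the proofs are below) =====
def Claim_equal_func : Prop := ∀ (s : String), Dom_func s → Spec_func s (func s)

-- ===== LEMMAS AND PROOFS =====

-- number of non-overlapping 'VK' matches (proof-side spec)
def pvCountVK : List Char → Nat
  | [] => 0
  | c :: rest =>
    if (c :: rest).take 2 = ['V', 'K'] then pvCountVK rest.tail + 1 else pvCountVK rest
  termination_by l => l.length
  decreasing_by
  · simp [List.length_tail]
  · simp

-- the segments of s.split('VK') (proof-side spec)
def pvSplitVK : List Char → List (List Char)
  | [] => [[]]
  | c :: rest =>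
    if (c :: rest).take 2 = ['V', 'K'] then [] :: pvSplitVK rest.tail
    else
      match pvSplitVK rest with
      | [] => [[c]]
      | sgm :: ss => (c :: sgm) :: ss
  termination_by l => l.length
  decreasing_by
  · simp [List.length_tail]
  · simp

-- prepend a prefix onto the first segment
def pvCons (p : List Char) : List (List Char) → List (List Char)
  | [] => [p]
  | sgm :: ss => (p ++ sgm) :: ss

theorem pvSplitVK_ne_nil (l : List Char) : pvSplitVK l ≠ [] := by
  cases l with
  | nil => simp [pvSplitVK]
  | cons c rest =>
    rw [pvSplitVK]
    split
    · simp
    · cases h : pvSplitVK rest <;> simp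

theorem pvCons_nil (l : List Char) : pvCons [] (pvSplitVK l) = pvSplitVK l := by
  cases h : pvSplitVK l with
  | nil => exact absurd h (pvSplitVK_ne_nil l)
  | cons s ss => simp [pvCons]

theorem flush_iff (i : List Char) : funcAlt_flush i = true ↔ (1 < i.length ∧ i ≠ ['K', 'V']) := by
  simp [funcAlt_flush]

theorem pvPrefix_iff (l : List Char) :
    (['V', 'K'].isPrefixOf l = true) ↔ l.take 2 = ['V', 'K'] := by
  rw [List.isPrefixOf_iff_prefix, List.prefix_iff_eq_take]
  exact eq_comm

theorem countGo_eq (f : Nat) : ∀ (l : List Char) (acc : Nat), l.length ≤ f →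
    PySem.Chars.count.go ['V', 'K'] f l acc = acc + pvCountVK l := by
  induction f with
  | zero =>
    intro l acc h
    have hl : l = [] := by cases l with | nil => rfl | cons a t => simp at h
    subst hl
    simp [PySem.Chars.count.go, pvCountVK]
  | succ f ih =>
    intro l acc h
    cases l with
    | nil => simp [PySem.Chars.count.go, pvCountVK]
    | cons c rest =>
      rw [PySem.Chars.count.go, pvCountVK]
      by_cases hp : (c :: rest).take 2 = ['V', 'K']
      · rw [if_pos ((pvPrefix_iff _).mpr hp), if_pos hp]
        have h2 : List.drop ['V','K'].length (c :: rest) = rest.tail := by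
          simp [List.drop_one]
        rw [h2, ih rest.tail (acc + 1)
          (by have ht := List.length_tail (l := rest)
              simp only [List.length_cons] at h; omega)]
        omega
      · rw [if_neg (fun hc => hp ((pvPrefix_iff _).mp hc)), if_neg hp,
            ih rest acc (by simp only [List.length_cons] at h; omega)]

theorem splitGo_eq (f : Nat) : ∀ (l cur : List Char) (acc : List (List Char)), l.length ≤ f →
    PySem.Chars.splitOn.go ['V', 'K'] f l cur acc
      = acc.reverse ++ pvCons cur.reverse (pvSplitVK l) := by
  induction f with
  | zero =>
    intro l cur acc h
    have hl : l = [] := by cases l with | nil => rfl | cons a t => simp at h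
    subst hl
    simp [PySem.Chars.splitOn.go, pvSplitVK, pvCons]
  | succ f ih =>
    intro l cur acc h
    cases l with
    | nil => simp [PySem.Chars.splitOn.go, pvSplitVK, pvCons]
    | cons c rest =>
      rw [PySem.Chars.splitOn.go, pvSplitVK]
      by_cases hp : (c :: rest).take 2 = ['V', 'K']
      · rw [if_pos ((pvPrefix_iff _).mpr hp), if_pos hp]
        have h2 : List.drop ['V','K'].length (c :: rest) = rest.tail := by
          simp [List.drop_one]
        rw [h2, ih rest.tail [] (cur.reverse :: acc)
          (by have ht := List.length_tail (l := rest)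
              simp only [List.length_cons] at h; omega)]
        cases hs : pvSplitVK rest.tail with
        | nil => exact absurd hs (pvSplitVK_ne_nil _)
        | cons s ss => simp [pvCons]
      · rw [if_neg (fun hc => hp ((pvPrefix_iff _).mp hc)), if_neg hp,
            ih rest (c :: cur) acc (by simp only [List.length_cons] at h; omega)]
        cases hs : pvSplitVK rest with
        | nil => exact absurd hs (pvSplitVK_ne_nil rest)
        | cons s ss => simp [pvCons]

theorem addLoop_eq (ss : List (List Char)) :
    func_addLoop ss = if ss.any funcAlt_flush then 1 else 0 := by
  induction ss with
  | nil => simp [func_addLoop]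
  | cons i rest ih =>
    rw [func_addLoop, ih]
    by_cases h : i.length > 1 ∧ i ≠ ['K', 'V']
    · rw [if_pos h]
      have hfi : funcAlt_flush i = true := (flush_iff i).mpr h
      simp [hfi]
    · rw [if_neg h]
      have hfi : funcAlt_flush i = false := by
        cases hf : funcAlt_flush i with
        | false => rfl
        | true => exact absurd ((flush_iff i).mp hf) h
      simp [hfi]

theorem goB_eq : ∀ (l : List Char) (count : Int) (add : Bool) (buf : List Char),
    funcAlt_go l count add buf
      = count + (pvCountVK l : Int)
          + (if add || (pvCons buf (pvSplitVK l)).any funcAlt_flush then 1 else 0) := by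
  intro l count add buf
  fun_induction funcAlt_go l count add buf with
  | case1 count add buf => simp [pvSplitVK, pvCountVK, pvCons]
  | case2 c rest count add buf hp ih =>
    rw [ih, pvCons_nil, pvSplitVK, if_pos hp, pvCountVK, if_pos hp]
    simp only [pvCons, List.append_nil, List.any_cons, Bool.or_assoc]
    push_cast
    ring
  | case3 c rest count add buf hp ih =>
    rw [ih, pvSplitVK, if_neg hp, pvCountVK, if_neg hp]
    cases hs : pvSplitVK rest with
    | nil => exact absurd hs (pvSplitVK_ne_nil rest)
    | cons s ss => simp [pvCons]

-- ===== VERDICT (by name: the statement is the Claim_ definition above) =====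
theorem func_spec : Claim_equal_func := by
  intro s _
  unfold Spec_func func func_alt
  have hVK : "VK".toList = ['V', 'K'] := rfl
  rw [hVK, PySem.Chars.splitOn, PySem.Chars.count,
      splitGo_eq _ _ _ _ (by omega), goB_eq]
  rw [if_neg (by simp)]
  rw [countGo_eq _ _ _ (le_refl _)]
  simp [pvCons_nil, addLoop_eq]
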